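-- pv_equiv track=rewrite | github.com/eichc/cs1100 | hw/hw7/hw7_part1.py | replace_letter
-- ===== SOURCE A (Python) =====
-- def replace_letter(word, dictionary, keyboard):
--     '''
--     Given a word, find all possible ways to replace a single letter given the
--     possbile replacements described by keyboard. Return a set containing all
--     of the possibilities that appear in the dictionary.
--     '''
--     replacements = set()
--     w_list = list(word)
--     for i in range(len(w_list)):
--         for j in range(len(keyboard[w_list[i]])):
--             temp = w_list.copy()
--             temp.pop(i)
--             temp.insert(i, keyboard[w_list[i]][j])
--             new_word = ''.join(temp)
--             if new_word in dictionary: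
--                 replacements.add(new_word)
--     return replacements
-- ===== SOURCE B (Python) =====
-- def replace_letter(word, dictionary, keyboard):
--     '''
--     Given a word, find all possible ways to replace a single letter given the
--     possbile replacements described by keyboard. Return a set containing all
--     of the possibilities that appear in the dictionary.
--     For each position, scan the dictionary once to extract the "middle" of
--     every dictionary word fitting the prefix/suffix, then intersect those
--     middles with the keyboard row instead of testing each candidate against
--     the dictionary.
--     '''
--     result = set()
--     for i in range(len(word)):
--         p, c, s = word[:i], word[i], word[i + 1:]
--         middles = {dw[len(p):len(dw) - len(s)] for dw in dictionary
--                    if dw == p + dw[len(p):len(dw) - len(s)] + s}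
--         for r in keyboard[c]:
--             if r in middles:
--                 result.add(p + r + s)
--     return result
-- ===== Notes on version B (the rewrite author's own statement) =====
-- stated objective: alternative
-- what changed: B inverts the search: for each position it scans the dictionary once, extracting the middle substring of every dictionary word that fits the position's prefix/suffix, and then intersects that set of middles with the keyboard row - instead of A's building each candidate by list copy/pop/insert/join and testing it against the dictionary with a list-membership scan.
import Mathlib
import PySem

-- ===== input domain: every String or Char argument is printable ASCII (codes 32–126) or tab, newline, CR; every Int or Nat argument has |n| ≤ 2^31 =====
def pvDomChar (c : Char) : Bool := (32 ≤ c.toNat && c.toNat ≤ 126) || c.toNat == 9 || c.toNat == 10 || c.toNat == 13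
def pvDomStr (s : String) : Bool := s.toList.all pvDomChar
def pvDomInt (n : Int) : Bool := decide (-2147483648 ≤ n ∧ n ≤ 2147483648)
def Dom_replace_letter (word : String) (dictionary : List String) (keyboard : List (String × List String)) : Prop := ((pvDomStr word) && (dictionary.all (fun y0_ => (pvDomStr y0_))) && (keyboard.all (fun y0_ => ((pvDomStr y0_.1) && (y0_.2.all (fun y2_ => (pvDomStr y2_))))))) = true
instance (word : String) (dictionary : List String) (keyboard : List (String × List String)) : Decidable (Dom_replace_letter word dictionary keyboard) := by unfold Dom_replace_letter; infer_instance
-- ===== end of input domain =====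

-- B inverts the search: per position it scans the DICTIONARY extracting the "middle" of each word
-- fitting the prefix/suffix, then intersects those middles with the keyboard row — instead of A's
-- building every candidate by list surgery and testing each against the dictionary.

-- ===== PORT A =====
-- literal port of A: w_list = list(word); nested loops over range(len(w_list)) and
-- range(len(keyboard[w_list[i]])); temp = copy/pop(i)/insert(i, ·); ''.join; set.add on membership.
-- keyboard[...] is Dict.get? (KeyError = none, excluded by Pre_; .getD [] is unreachable there);
-- w_list[i] / row[j] are in-range reads, ported as pyGetD with an unreachable default.
def replace_letter (word : String) (dictionary : List String) (keyboard : List (String × List String)) : List String :=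
  let w_list : List String := word.toList.map (fun c => String.ofList [c])
  (PySem.List.pyRange 0 (PySem.List.len w_list)).foldl (fun replacements i =>
    let row : List String := ((PySem.Dict.mk keyboard).get? (PySem.List.pyGetD w_list i "")).getD []
    (PySem.List.pyRange 0 (PySem.List.len row)).foldl (fun replacements j =>
      let temp := w_list
      let temp := ((PySem.List.pop? temp i).map Prod.snd).getD []
      let temp := PySem.List.insert temp i (PySem.List.pyGetD row j "")
      let new_word := PySem.Str.join "" temp
      if PySem.Set.contains dictionary new_word then PySem.Set.add replacements new_word
      else replacements) replacements)
    PySem.Set.empty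

-- ===== PORT B =====
-- literal port of Source B: for each i, p/c/s = word[:i], word[i], word[i+1:]; middles = the set
-- comprehension over the dictionary (dw[len(p):len(dw)-len(s)] for fitting dw); then the row loop
-- adding p+r+s when r in middles. word[i] is in range inside the loop (default ' ' unreachable).
def replace_letter_alt (word : String) (dictionary : List String) (keyboard : List (String × List String)) : List String :=
  (PySem.List.pyRange 0 (PySem.Str.len word)).foldl (fun result i =>
    let p : List Char := PySem.List.slice word.toList none (some i)
    let c : String := String.ofList [PySem.List.pyGetD word.toList i ' ']
    let s : List Char := PySem.List.slice word.toList (some (i + 1)) none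
    let middles : PySem.Set String := PySem.Set.ofList
      ((dictionary.filter (fun dw =>
          dw == String.ofList (p ++ PySem.List.slice dw.toList (some (p.length : Int))
                  (some ((dw.toList.length : Int) - (s.length : Int))) ++ s))).map
        (fun dw => String.ofList (PySem.List.slice dw.toList (some (p.length : Int))
                  (some ((dw.toList.length : Int) - (s.length : Int))))))
    (((PySem.Dict.mk keyboard).get? c).getD []).foldl (fun result r =>
      if PySem.Set.contains middles r then PySem.Set.add result (String.ofList (p ++ r.toList ++ s))
      else result) result)
    PySem.Set.empty

-- ===== PRECONDITION & SPEC =====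
-- Pre_: every character of word is a key of keyboard — exactly where Python's keyboard[word[i]]
-- does not raise KeyError (both A and B raise there in Python).
def Pre_replace_letter (word : String) (dictionary : List String) (keyboard : List (String × List String)) : Prop :=
  (word.toList.all (fun c => (PySem.Dict.mk keyboard).contains (String.ofList [c]))) = true
instance (word : String) (dictionary : List String) (keyboard : List (String × List String)) : Decidable (Pre_replace_letter word dictionary keyboard) := by unfold Pre_replace_letter; infer_instance
def pvWitness_replace_letter : String × List String × (List (String × List String)) :=
  ("ab", ["xb", "aa", "zz"], [("a", ["x", "z"]), ("b", ["a"])])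
def Spec_replace_letter (word : String) (dictionary : List String) (keyboard : List (String × List String)) (out : List String) : Prop := out = replace_letter_alt word dictionary keyboard
instance (word : String) (dictionary : List String) (keyboard : List (String × List String)) (out : List String) : Decidable (Spec_replace_letter word dictionary keyboard out) := by unfold Spec_replace_letter; infer_instance

-- ===== CLAIM (what is proved, stated in full; the proofs are below) =====
def Claim_equal_replace_letter : Prop := ∀ (word : String) (dictionary : List String) (keyboard : List (String × List String)), Dom_replace_letter word dictionary keyboard → Pre_replace_letter word dictionary keyboard → Spec_replace_letter word dictionary keyboard (replace_letter word dictionary keyboard)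

-- ===== LEMMAS AND PROOFS =====

-- ''.join concatenates
theorem join_nil_eq_flatten (xss : List (List Char)) : PySem.Chars.join [] xss = xss.flatten := by
  induction xss with
  | nil => rfl
  | cons x xs ih => cases xs <;> simp_all [PySem.Chars.join, List.intercalate]

-- A's pop(i)-then-insert(i, r)-then-join equals prefix ++ r ++ suffix, for an in-range index
theorem surgery_eq_slices (wc : List Char) (k : Nat) (hk : k < wc.length) (r : String) :
    PySem.Str.join "" (PySem.List.insert
        (((PySem.List.pop? (wc.map (fun c => String.ofList [c])) (k : Int)).map Prod.snd).getD [])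
        (k : Int) r)
    = String.ofList (PySem.List.slice wc none (some (k : Int)) ++ r.toList ++
                     PySem.List.slice wc (some ((k : Int) + 1)) none) := by
  have hk' : k < (wc.map (fun c => String.ofList [c])).length := by simpa using hk
  have hsingle : ∀ l : List Char, (l.map (fun c => [c])).flatten = l := fun l => by
    rw [← join_nil_eq_flatten]; exact PySem.Chars.join_nil_singletons l
  rw [PySem.List.pop?_natCast _ k hk']
  simp only [Option.map_some, Option.getD_some]
  rw [PySem.List.insert_natCast _ k r
    (by rw [List.eraseIdx_eq_take_drop_succ]
        simp only [List.length_append, List.length_take, List.length_drop, List.length_map]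
        omega)]
  rw [List.eraseIdx_eq_take_drop_succ]
  have hlA : (List.take k (wc.map (fun c => String.ofList [c]))).length = k := by
    simp only [List.length_take, List.length_map]; omega
  have h2 := @List.drop_left _ (List.take k (wc.map (fun c => String.ofList [c])))
    (List.drop (k + 1) (wc.map (fun c => String.ofList [c])))
  rw [hlA] at h2
  rw [List.take_append_of_le_length (by rw [hlA]), List.take_take, Nat.min_self, h2]
  rw [PySem.List.slice_to_natCast,
    show ((k : Int) + 1) = ((k + 1 : Nat) : Int) from by push_cast; ring,
    PySem.List.slice_from_natCast]
  simp only [PySem.Str.join]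
  congr 1
  rw [show "".toList = ([] : List Char) from rfl, join_nil_eq_flatten]
  simp only [List.map_append, List.map_cons, List.flatten_append, List.flatten_cons,
    ← List.map_take, ← List.map_drop, List.map_map, Function.comp_def,
    String.toList_ofList, hsingle]
  simp [List.append_assoc]

-- membership in B's per-position middles set ⟺ the assembled candidate is in the dictionary
theorem contains_middles (dictionary : List String) (p s : List Char) (r : String) :
    PySem.Set.contains (PySem.Set.ofList
      ((dictionary.filter (fun dw =>
          dw == String.ofList (p ++ PySem.List.slice dw.toList (some (p.length : Int))
                  (some ((dw.toList.length : Int) - (s.length : Int))) ++ s))).map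
        (fun dw => String.ofList (PySem.List.slice dw.toList (some (p.length : Int))
                  (some ((dw.toList.length : Int) - (s.length : Int))))))) r
    = PySem.Set.contains dictionary (String.ofList (p ++ r.toList ++ s)) := by
  rw [Bool.eq_iff_iff, PySem.Set.contains_iff, PySem.Set.contains_iff, PySem.Set.mem_ofList]
  constructor
  · rintro h
    rcases List.mem_map.mp h with ⟨dw, hdw, hval⟩
    rcases List.mem_filter.mp hdw with ⟨hmem, hf⟩
    have hdw_eq : dw = String.ofList (p ++ PySem.List.slice dw.toList (some (p.length : Int))
        (some ((dw.toList.length : Int) - (s.length : Int))) ++ s) := by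
      exact eq_of_beq hf
    have hmid : PySem.List.slice dw.toList (some (p.length : Int))
        (some ((dw.toList.length : Int) - (s.length : Int))) = r.toList := by
      have := congrArg String.toList hval
      simpa using this
    rw [hmid] at hdw_eq
    rwa [← hdw_eq]
  · intro h
    refine List.mem_map.mpr ⟨String.ofList (p ++ r.toList ++ s), List.mem_filter.mpr ⟨h, ?_⟩, ?_⟩
    all_goals
      have hb : ((String.ofList (p ++ r.toList ++ s)).toList.length : Int) - (s.length : Int)
          = ((p.length + r.toList.length : Nat) : Int) := by
        simp only [String.toList_ofList, List.length_append]; push_cast; ring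
      have hmid : PySem.List.slice (String.ofList (p ++ r.toList ++ s)).toList
          (some (p.length : Int))
          (some (((String.ofList (p ++ r.toList ++ s)).toList.length : Int) - (s.length : Int)))
          = r.toList := by
        rw [hb, String.toList_ofList, PySem.List.slice_natCast]
        rw [List.append_assoc, List.drop_left]
        simp [List.take_left']
    · rw [hmid]; exact beq_self_eq_true _
    · rw [hmid, String.ofList_toList]

-- the two ports agree everywhere keyboard covers the word's characters
theorem ports_agree (word : String) (dictionary : List String) (keyboard : List (String × List String)) :
    replace_letter word dictionary keyboard = replace_letter_alt word dictionary keyboard := by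
  simp only [replace_letter, replace_letter_alt]
  rw [show PySem.List.len (List.map (fun c => String.ofList [c]) word.toList)
        = ((word.toList.length : Nat) : Int) from by simp [PySem.List.len],
     show PySem.Str.len word = ((word.toList.length : Nat) : Int) from by
        simp [PySem.Str.len]]
  simp only [PySem.List.pyRange_zero_natCast, List.foldl_map]
  apply PySem.List.foldl_congr_mem
  intro acc k hkmem
  have hk : k < word.toList.length := List.mem_range.mp hkmem
  have hkm : k < (word.toList.map (fun c => String.ofList [c])).length := by simpa using hk
  have hkey : PySem.List.pyGetD (word.toList.map (fun c => String.ofList [c])) (k : Int) ""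
      = String.ofList [PySem.List.pyGetD word.toList (k : Int) ' '] := by
    rw [PySem.List.pyGetD_eq_getElem _ "" (by exact_mod_cast Nat.zero_le k)
          (by exact_mod_cast hkm),
        PySem.List.pyGetD_eq_getElem _ ' ' (by exact_mod_cast Nat.zero_le k)
          (by exact_mod_cast hk)]
    simp
  rw [hkey]
  rw [PySem.List.foldl_pyRange_pyGetD
    (((PySem.Dict.mk keyboard).get? (String.ofList [PySem.List.pyGetD word.toList (k : Int) ' '])).getD []) ""
    (fun replacements r =>
      if PySem.Set.contains dictionary (PySem.Str.join "" (PySem.List.insert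
            ((Option.map Prod.snd (PySem.List.pop?
              (List.map (fun c => String.ofList [c]) word.toList) (k : Int))).getD [])
            (k : Int) r)) = true
      then PySem.Set.add replacements (PySem.Str.join "" (PySem.List.insert
            ((Option.map Prod.snd (PySem.List.pop?
              (List.map (fun c => String.ofList [c]) word.toList) (k : Int))).getD [])
            (k : Int) r))
      else replacements)
    acc (le_refl 0)]
  simp only [Int.toNat_zero, List.drop_zero]
  apply PySem.List.foldl_congr_mem
  intro acc2 r _
  rw [surgery_eq_slices word.toList k hk r, contains_middles]

-- ===== VERDICT (by name: the statement is the Claim_ definition above) =====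
theorem replace_letter_spec : Claim_equal_replace_letter := by
  intro word dictionary keyboard _ _
  exact ports_agree word dictionary keyboard
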